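-- pv_equiv track=rewrite | github.com/awslabs/mcp | src/oracle-mcp-server/awslabs/oracle_mcp_server/server.py | _parse_identifier_parts
-- ===== SOURCE A (Python) =====
-- from typing import Annotated, Any, Dict, List, Optional, Tuple
--
-- def _parse_identifier_parts(table_name: str) -> Optional[list[tuple[str, bool]]]:
--     """Parse a possibly-qualified Oracle table name into its identifier parts.
--
--     Oracle uses double-quote delimited identifiers (standard ANSI SQL).
--     Returns a list of (identifier_text, was_quoted) tuples, or None on parse error.
--     """
--     parts: list[tuple[str, bool]] = []
--     pos = 0
--     length = len(table_name)
--
--     while pos < length: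
--         if table_name[pos] == '"':
--             pos += 1
--             content = []
--             while pos < length:
--                 ch = table_name[pos]
--                 if ch == '\0':
--                     return None
--                 if ch == '"':
--                     if pos + 1 < length and table_name[pos + 1] == '"':
--                         content.append('"')
--                         pos += 2
--                     else:
--                         pos += 1
--                         break
--                 else:
--                     content.append(ch)
--                     pos += 1
--             else:
--                 return None
--             identifier = ''.join(content)
--             if not identifier:
--                 return None
--             parts.append((identifier, True))
--         else:
--             ch = table_name[pos]
--             if not (ch.isalpha() or ch == '_'):
--                 return None
--             start = pos
--             pos += 1
--             while pos < length:
--                 ch = table_name[pos]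
--                 if ch.isalpha() or ch.isdigit() or ch in ('_', '$', '#'):
--                     pos += 1
--                 else:
--                     break
--             parts.append((table_name[start:pos], False))
--
--         if pos < length:
--             if table_name[pos] == '.':
--                 pos += 1
--                 if pos >= length:
--                     return None
--             else:
--                 return None
--
--     return parts if parts else None
-- ===== SOURCE B (Python) =====
-- from typing import Optional
--
--
-- def _unescape(inner: str) -> Optional[str]:
--     """Collapse doubled '""' to '"'; None if a lone '"' remains."""
--     if not inner:
--         return ''
--     if inner[0] == '"':
--         if inner[1:2] == '"':
--             rest = _unescape(inner[2:])
--             return None if rest is None else '"' + rest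
--         return None
--     rest = _unescape(inner[1:])
--     return None if rest is None else inner[0] + rest
--
--
-- def _validate_segment(seg: str):
--     """Validate one raw top-level segment; (text, was_quoted) or None."""
--     if seg[:1] == '"':
--         if len(seg) < 2 or seg[-1] != '"':
--             return None
--         content = _unescape(seg[1:-1])
--         if not content:
--             return None
--         return (content, True)
--     if not seg or not (seg[0].isalpha() or seg[0] == '_'):
--         return None
--     if not all(ch.isalpha() or ch.isdigit() or ch in '_$#' for ch in seg[1:]):
--         return None
--     return (seg, False)
--
--
-- def _parse_identifier_parts(table_name: str):
--     # Phase 1: split into raw top-level segments (dots inside quotes kept).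
--     segments = []
--     buf = []
--     in_quote = False
--     for ch in table_name:
--         if ch == '"':
--             in_quote = not in_quote
--             buf.append(ch)
--         elif ch == '.' and not in_quote:
--             segments.append(''.join(buf))
--             buf = []
--         else:
--             buf.append(ch)
--     segments.append(''.join(buf))
--     if in_quote:
--         return None
--     # Phase 2: validate and normalise each segment.
--     parts = []
--     for seg in segments:
--         part = _validate_segment(seg)
--         if part is None:
--             return None
--         parts.append(part)
--     return parts
-- ===== Notes on version B (the rewrite author's own statement) =====
-- stated objective: alternative
-- what changed: A is a single-pass positional state machine that parses, validates and consumes dots all at once; B first splits the string into raw top-level segments with a quote-toggling scan, then validates/normalises each segment in a separate phase (recursive quote-collapse helper, all()-based identifier check).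
import Mathlib
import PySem

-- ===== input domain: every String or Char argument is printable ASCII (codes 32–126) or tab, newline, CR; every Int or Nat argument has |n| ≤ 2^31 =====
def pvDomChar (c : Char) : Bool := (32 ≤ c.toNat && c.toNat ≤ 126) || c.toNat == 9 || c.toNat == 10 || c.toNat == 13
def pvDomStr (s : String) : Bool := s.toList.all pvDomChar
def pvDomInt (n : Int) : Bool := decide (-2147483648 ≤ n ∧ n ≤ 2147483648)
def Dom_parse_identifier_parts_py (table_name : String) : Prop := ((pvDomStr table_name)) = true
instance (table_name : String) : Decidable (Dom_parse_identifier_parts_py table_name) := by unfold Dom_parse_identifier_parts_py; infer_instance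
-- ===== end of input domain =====

-- B is an alternative decomposition (split into raw top-level segments, then validate each);
-- return values agree with A on the whole ASCII domain (B drops A's NUL check, which is dead on Dom).

-- shared character class: continuation character of an unquoted identifier (used verbatim by both Pythons)
def pvIdentChar (c : Char) : Bool :=
  PySem.Chars.isalpha c || PySem.Chars.isdigit c || (c = '_' || c = '$' || c = '#')

-- ===== PORT A =====
-- inner while loop of the quoted branch: accumulated content + remaining input; none = NUL or unterminated
def aQuoted : List Char → List Char → Option (List Char × List Char)
  | _, [] => none
  | acc, c :: rest =>
    if c = '\x00' then none
    else if c = '"' then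
      match rest with
      | '"' :: r => aQuoted (acc ++ ['"']) r
      | _ => some (acc, rest)
    else aQuoted (acc ++ [c]) rest

-- inner while loop of the unquoted branch: consumed identifier chars + remaining input
def aUnquoted : List Char → (List Char × List Char)
  | [] => ([], [])
  | c :: rest =>
    if pvIdentChar c then
      let (t, r) := aUnquoted rest
      (c :: t, r)
    else ([], c :: rest)

theorem aQuoted_rest_le : ∀ (acc l : List Char) {p}, aQuoted acc l = some p → p.2.length < l.length := by
  intro acc l p h
  induction acc, l using aQuoted.induct generalizing p with
  | case1 x => simp [aQuoted] at h
  | case2 acc rest => rw [aQuoted.eq_def] at h; simp at h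
  | case3 acc r hne ih =>
    rw [aQuoted.eq_def] at h; simp at h
    have := ih h; simp at this ⊢; omega
  | case4 acc rest hne hnz =>
    rw [aQuoted.eq_def] at h; simp at h
    cases h; simp
  | case5 acc c rest hz hq ih =>
    rw [aQuoted.eq_def] at h; simp [hz, hq] at h
    have := ih h; simp at this ⊢; omega

theorem aUnquoted_rest_le : ∀ (l : List Char), (aUnquoted l).2.length ≤ l.length := by
  intro l
  induction l with
  | nil => simp [aUnquoted]
  | cons c rest ih =>
    simp only [aUnquoted]
    split
    · simp; omega
    · simp

-- main while loop of A
def aMain : List Char → List (String × Bool) → Option (List (String × Bool))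
  | [], parts => if parts = [] then none else some parts
  | c :: rest, parts =>
    if c = '"' then
      match h : aQuoted [] rest with
      | none => none
      | some (content, rest') =>
        if content = [] then none
        else
          let parts' := parts ++ [(String.ofList content, true)]
          match hq : rest' with
          | [] => some parts'
          | d :: rest'' =>
            if d = '.' then (if rest'' = [] then none else aMain rest'' parts') else none
    else if pvIdentChar0 : PySem.Chars.isalpha c || c = '_' then
      let tr := aUnquoted rest
      let parts' := parts ++ [(String.ofList (c :: tr.1), false)]
      match hr : tr.2 with
      | [] => some parts'
      | d :: r'' =>
        if d = '.' then (if r'' = [] then none else aMain r'' parts') else none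
    else none
termination_by l _ => l.length
decreasing_by
  · have := aQuoted_rest_le [] rest h; simp at this ⊢; omega
  · have := aUnquoted_rest_le rest; rw [hr] at this; simp at this ⊢; omega

def parse_identifier_parts_py (table_name : String) : Option (List (String × Bool)) :=
  aMain table_name.toList []

-- ===== PORT B =====
-- phase 1: the for loop splitting into raw top-level segments, returning (segments, final in_quote flag)
def bSplit : List Char → List Char → Bool → (List (List Char) × Bool)
  | [], buf, inq => ([buf], inq)
  | c :: rest, buf, inq =>
    if c = '"' then bSplit rest (buf ++ [c]) (!inq)
    else if c = '.' ∧ inq = false then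
      let (segs, q) := bSplit rest [] inq
      (buf :: segs, q)
    else bSplit rest (buf ++ [c]) inq

-- _unescape: collapse doubled quotes, none on a lone quote
def bUnescape : List Char → Option (List Char)
  | [] => some []
  | '"' :: rest =>
    match rest with
    | '"' :: r => (bUnescape r).map ('"' :: ·)
    | _ => none
  | c :: rest => (bUnescape rest).map (c :: ·)

-- _validate_segment
def bValidSeg (seg : List Char) : Option (String × Bool) :=
  match seg with
  | '"' :: rest =>
    if rest = [] ∨ rest.getLast? ≠ some '"' then none
    else
      match bUnescape rest.dropLast with
      | none => none
      | some u => if u = [] then none else some (String.ofList u, true)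
  | c :: rest =>
    if PySem.Chars.isalpha c || c = '_' then
      if rest.all pvIdentChar then some (String.ofList seg, false) else none
    else none
  | [] => none

-- phase 2 loop over the segments
def bValidate : List (List Char) → Option (List (String × Bool))
  | [] => some []
  | s :: ss =>
    match bValidSeg s with
    | none => none
    | some p => (bValidate ss).map (p :: ·)

def parse_identifier_parts_py_alt (table_name : String) : Option (List (String × Bool)) :=
  let (segs, inq) := bSplit table_name.toList [] false
  if inq then none else bValidate segs

-- ===== PRECONDITION & SPEC =====
def Spec_parse_identifier_parts_py (table_name : String) (out : Option (List (String × Bool))) : Prop := out = parse_identifier_parts_py_alt table_name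
instance (table_name : String) (out : Option (List (String × Bool))) : Decidable (Spec_parse_identifier_parts_py table_name out) := by unfold Spec_parse_identifier_parts_py; infer_instance

-- ===== CLAIM (what is proved, stated in full; the proofs are below) =====
def Claim_equal_parse_identifier_parts_py : Prop := ∀ (table_name : String), Dom_parse_identifier_parts_py table_name → Spec_parse_identifier_parts_py table_name (parse_identifier_parts_py table_name)

-- ===== LEMMAS AND PROOFS =====

-- B's whole pipeline on a suffix of the input, used as the induction invariant
def bFull (l : List Char) : Option (List (String × Bool)) :=
  if (bSplit l [] false).2 then none else bValidate (bSplit l [] false).1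

theorem bFull_spec (s : String) : parse_identifier_parts_py_alt s = bFull s.toList := rfl

-- no NUL and an unterminated quote scan ⇒ the toggling scan ends still in-quote
theorem aQuoted_none_inq : ∀ (acc l : List Char), (∀ c ∈ l, c ≠ '\x00') →
    aQuoted acc l = none → ∀ buf, (bSplit l buf true).2 = true := by
  intro acc l
  induction acc, l using aQuoted.induct with
  | case1 x => intro _ _ buf; simp [bSplit]
  | case2 acc rest => intro hz _ _; exact absurd rfl (hz '\x00' (by simp))
  | case3 acc r hne ih =>
    intro hz h buf
    rw [aQuoted.eq_def] at h; simp at h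
    have := ih (fun c hc => hz c (by simp [hc])) h (buf ++ ['"'] ++ ['"'])
    simp only [bSplit, if_pos rfl, Bool.not_true, Bool.not_false] at this ⊢
    simpa using this
  | case4 acc rest hne hnz =>
    intro _ h _
    rw [aQuoted.eq_def] at h; simp at h
  | case5 acc c rest hz' hq ih =>
    intro hz h buf
    rw [aQuoted.eq_def] at h; simp [hz', hq] at h
    have := ih (fun c' hc => hz c' (by simp [hc])) h (buf ++ [c])
    rw [bSplit, if_neg hq]
    rw [if_neg (by simp)]
    exact this

-- successful quote scan ⇒ decomposition l = w ++ '"' :: rest with w unescapable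
theorem aQuoted_some_decomp : ∀ (acc l : List Char), (∀ c ∈ l, c ≠ '\x00') →
    ∀ content rest, aQuoted acc l = some (content, rest) →
      ∃ w u, l = w ++ '"' :: rest ∧ bUnescape w = some u ∧ content = acc ++ u ∧
        (∀ c', rest.head? = some c' → c' ≠ '"') := by
  intro acc l
  induction acc, l using aQuoted.induct with
  | case1 x => intro _ content rest h; simp [aQuoted] at h
  | case2 acc rest => intro hz _ _ _; exact absurd rfl (hz '\x00' (by simp))
  | case3 acc r hne ih =>
    intro hz content rest h
    rw [aQuoted.eq_def] at h; simp at h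
    obtain ⟨w', u', hl, hu, hc, hh⟩ := ih (fun c hc => hz c (by simp [hc])) content rest h
    refine ⟨'"' :: '"' :: w', '"' :: u', by simp [hl], ?_, by simp [hc], hh⟩
    rw [bUnescape]; simp [hu]
  | case4 acc rest hne hnz =>
    intro _ content rest' h
    rw [aQuoted.eq_def] at h; simp at h
    obtain ⟨hc, hr⟩ := h
    refine ⟨[], [], by simp [hr], rfl, by simp [hc], ?_⟩
    intro c' hh he
    subst he hr
    rcases rest with _ | ⟨x, xs⟩
    · simp at hh
    · simp at hh; exact hne xs (by rw [hh])
  | case5 acc c rest hz' hq ih =>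
    intro hz content rest' h
    rw [aQuoted.eq_def] at h; simp [hz', hq] at h
    obtain ⟨w', u', hl, hu, hc, hh⟩ := ih (fun c' hc => hz c' (by simp [hc])) content rest' h
    refine ⟨c :: w', c :: u', by simp [hl], ?_, by simp [hc], hh⟩
    rw [bUnescape.eq_def]
    rcases hcc : c :: w' with _ | ⟨x, xs⟩
    · simp at hcc
    · simp at hcc
      obtain ⟨hx, hxs⟩ := hcc
      subst hx hxs
      simp [hq, hu]

-- an unescapable w is passed through untouched by the in-quote scanner
theorem bSplit_pass_quoted (w : List Char) : ∀ {u}, bUnescape w = some u →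
    ∀ l' buf, bSplit (w ++ l') buf true = bSplit l' (buf ++ w) true := by
  induction w using bUnescape.induct with
  | case1 => intro u _ l' buf; simp
  | case2 r ih =>
    intro u h l' buf
    rw [bUnescape.eq_def] at h; simp at h
    obtain ⟨u', hu, _⟩ := h
    simp only [List.cons_append, bSplit, if_pos rfl, Bool.not_true, Bool.not_false]
    rw [ih hu l' (buf ++ ['"'] ++ ['"'])]
    simp
  | case3 rest hne =>
    intro u h l' buf
    rw [bUnescape.eq_def] at h; simp at h
  | case4 c rest hq ih =>
    intro u h l' buf
    have hq' : ¬ c = '"' := fun e => hq e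
    rw [bUnescape.eq_def] at h
    simp [hq'] at h
    obtain ⟨u', hu, _⟩ := h
    simp only [List.cons_append, bSplit]
    rw [if_neg hq', if_neg (by simp)]
    rw [ih hu l' (buf ++ [c])]
    simp

-- identifier characters are passed through untouched by the out-of-quote scanner
theorem pvIdentChar_ne (c : Char) (h : pvIdentChar c = true) : c ≠ '"' ∧ c ≠ '.' := by
  constructor <;> intro he <;> subst he <;> simp [pvIdentChar] at h <;> revert h <;> decide

theorem bSplit_pass_ident (t : List Char) (h : ∀ c ∈ t, pvIdentChar c = true) :
    ∀ l' buf, bSplit (t ++ l') buf false = bSplit l' (buf ++ t) false := by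
  induction t with
  | nil => simp
  | cons c t' ih =>
    intro l' buf
    have hc := pvIdentChar_ne c (h c (by simp))
    simp only [List.cons_append, bSplit, if_neg hc.1]
    rw [if_neg (by simp [hc.2])]
    rw [ih (fun c' hc' => h c' (by simp [hc'])) l' (buf ++ [c])]
    simp

-- the first segment produced always extends the current buffer
theorem bSplit_first_ext (l : List Char) : ∀ buf inq,
    ∃ t rest, (bSplit l buf inq).1 = (buf ++ t) :: rest := by
  induction l with
  | nil => intro buf inq; exact ⟨[], [], by simp [bSplit]⟩
  | cons c r ih =>
    intro buf inq
    by_cases hc : c = '"'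
    · obtain ⟨t, rest, ht⟩ := ih (buf ++ [c]) (!inq)
      exact ⟨c :: t, rest, by rw [bSplit, if_pos hc]; simpa using ht⟩
    · by_cases hd : c = '.' ∧ inq = false
      · refine ⟨[], ((bSplit r [] inq).1), ?_⟩
        rw [bSplit, if_neg hc, if_pos hd]
        simp
      · obtain ⟨t, rest, ht⟩ := ih (buf ++ [c]) inq
        exact ⟨c :: t, rest, by rw [bSplit, if_neg hc, if_neg hd]; simpa using ht⟩

-- a clean unescape followed by a lone quote fails
theorem bUnescape_lone (w : List Char) : ∀ {u}, bUnescape w = some u → ∀ (c₀ : Char), c₀ ≠ '"' →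
    ∀ r, bUnescape (w ++ '"' :: c₀ :: r) = none := by
  induction w using bUnescape.induct with
  | case1 =>
    intro u _ c₀ hc r
    rw [bUnescape.eq_def]; simp [hc]
  | case2 r' ih =>
    intro u h c₀ hc r
    rw [bUnescape.eq_def] at h; simp at h
    obtain ⟨u', hu, _⟩ := h
    rw [show ('"' :: '"' :: r') ++ '"' :: c₀ :: r = '"' :: '"' :: (r' ++ '"' :: c₀ :: r) from by simp]
    rw [bUnescape.eq_def]; simp
    exact ih hu c₀ hc r
  | case3 rest hne =>
    intro u h c₀ hc r
    rw [bUnescape.eq_def] at h; simp at h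
  | case4 c rest hq ih =>
    intro u h c₀ hc r
    have hq' : ¬ c = '"' := fun e => hq e
    rw [bUnescape.eq_def] at h; simp [hq'] at h
    obtain ⟨u', hu, _⟩ := h
    rw [show (c :: rest) ++ '"' :: c₀ :: r = c :: (rest ++ '"' :: c₀ :: r) from by simp]
    rw [bUnescape.eq_def]; simp [hq']
    exact ih hu c₀ hc r

-- garbage after the closing quote makes the quoted segment invalid
theorem bValidSeg_quoted_garbage (w : List Char) {u} (h : bUnescape w = some u)
    (c₀ : Char) (hc : c₀ ≠ '"') (t : List Char) :
    bValidSeg ('"' :: (w ++ '"' :: c₀ :: t)) = none := by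
  rcases List.eq_nil_or_concat t with ht | ⟨t', x, ht⟩
  · subst ht
    rw [bValidSeg]
    rw [if_pos]
    right
    rw [show w ++ ['"', c₀] = (w ++ ['"']) ++ [c₀] from by simp]
    rw [List.getLast?_concat]
    simp [hc]
  · subst ht
    simp only [List.concat_eq_append]
    by_cases hx : x = '"'
    · subst hx
      rw [bValidSeg]
      rw [if_neg (by
        rw [show w ++ '"' :: c₀ :: (t' ++ ['"']) = (w ++ '"' :: c₀ :: t') ++ ['"'] from by simp]
        rw [List.getLast?_concat]
        simp)]
      rw [show w ++ '"' :: c₀ :: (t' ++ ['"']) = (w ++ '"' :: c₀ :: t') ++ ['"'] from by simp]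
      rw [List.dropLast_concat]
      rw [bUnescape_lone w h c₀ hc t']
    · rw [bValidSeg]
      rw [if_pos]
      right
      rw [show w ++ '"' :: c₀ :: (t' ++ [x]) = (w ++ '"' :: c₀ :: t') ++ [x] from by simp]
      rw [List.getLast?_concat]
      simp [hx]

-- a good quoted segment validates to its unescaped content
theorem bValidSeg_quoted_good (w : List Char) {u} (h : bUnescape w = some u) :
    bValidSeg ('"' :: (w ++ ['"'])) = if u = [] then none else some (String.ofList u, true) := by
  rw [bValidSeg]
  rw [if_neg (by rw [List.getLast?_concat]; simp)]
  rw [List.dropLast_concat, h]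

-- a non-identifier char in the tail invalidates an unquoted segment
theorem bValidSeg_bad_tail (c : Char) (hcq : c ≠ '"') (t : List Char) (c' : Char)
    (hc' : pvIdentChar c' = false) (t₂ : List Char) :
    bValidSeg (c :: (t ++ c' :: t₂)) = none := by
  rw [bValidSeg.eq_def]
  split
  · rename_i rest heq
    exact absurd (by injection heq) hcq
  · rename_i c2 rest2 heq
    injection heq with h1 h2
    subst h1
    subst h2
    simp only [List.all_append, List.all_cons, hc', Bool.false_and, Bool.and_false]
    split <;> simp
  · rename_i heq
    exact absurd heq (by simp)

theorem bValidSeg_bad_head (c : Char) (hcq : c ≠ '"')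
    (h0 : (PySem.Chars.isalpha c || decide (c = '_')) = false) (t : List Char) :
    bValidSeg (c :: t) = none := by
  rw [bValidSeg.eq_def]
  split
  · rename_i rest heq
    exact absurd (by injection heq) hcq
  · rename_i c2 rest2 heq
    injection heq with h1 h2
    subst h1; subst h2
    rw [if_neg (by simp [h0])]
  · rename_i heq
    exact absurd heq (by simp)

theorem bValidSeg_good_unquoted (c : Char) (hcq : c ≠ '"')
    (h0 : (PySem.Chars.isalpha c || decide (c = '_')) = true) (t : List Char)
    (ht : t.all pvIdentChar = true) :
    bValidSeg (c :: t) = some (String.ofList (c :: t), false) := by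
  rw [bValidSeg.eq_def]
  split
  · rename_i rest heq
    exact absurd (by injection heq) hcq
  · rename_i c2 rest2 heq
    injection heq with h1 h2
    subst h1; subst h2
    rw [if_pos h0, if_pos ht]
  · rename_i heq
    exact absurd heq (by simp)

theorem bValidate_cons_none {s : List Char} (h : bValidSeg s = none) (ss : List (List Char)) :
    bValidate (s :: ss) = none := by
  rw [bValidate, h]

theorem bValidate_cons_some {s : List Char} {p} (h : bValidSeg s = some p) (ss : List (List Char)) :
    bValidate (s :: ss) = (bValidate ss).map (p :: ·) := by
  rw [bValidate, h]

theorem aUnquoted_spec : ∀ (l : List Char), l = (aUnquoted l).1 ++ (aUnquoted l).2 ∧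
    (∀ c ∈ (aUnquoted l).1, pvIdentChar c = true) ∧
    (∀ c', (aUnquoted l).2.head? = some c' → pvIdentChar c' = false) := by
  intro l
  induction l with
  | nil => simp [aUnquoted]
  | cons c rest ih =>
    by_cases hc : pvIdentChar c = true
    · obtain ⟨h1, h2, h3⟩ := ih
      have e1 : (aUnquoted (c :: rest)).1 = c :: (aUnquoted rest).1 := by
        rw [aUnquoted]; simp [hc]
      have e2 : (aUnquoted (c :: rest)).2 = (aUnquoted rest).2 := by
        rw [aUnquoted]; simp [hc]
      rw [e1, e2]
      refine ⟨by rw [List.cons_append, ← h1], ?_, h3⟩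
      intro c' hc'
      rcases List.mem_cons.mp hc' with h | h
      · rw [h]; exact hc
      · exact h2 c' h
    · have hcf : pvIdentChar c = false := by simpa using hc
      rw [aUnquoted]
      simp only [hcf, Bool.false_eq_true, if_false]
      refine ⟨by simp, by simp, ?_⟩
      intro c' hc'
      simp at hc'
      rw [← hc']
      exact hcf

theorem head_ok_ne (c : Char) (h0 : (PySem.Chars.isalpha c || decide (c = '_')) = true) :
    c ≠ '"' ∧ c ≠ '.' := by
  constructor <;> intro he <;> subst he <;> revert h0 <;> decide

theorem master : ∀ (n : Nat) (l : List Char), l.length ≤ n → l ≠ [] →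
    (∀ c ∈ l, c ≠ '\x00') → ∀ parts,
    aMain l parts = Option.map (parts ++ ·) (bFull l) := by
  intro n
  induction n with
  | zero =>
    intro l hl hne _
    exact absurd (List.eq_nil_of_length_eq_zero (Nat.le_zero.mp hl)) hne
  | succ n ih =>
    intro l hl hne hz parts
    rcases l with _ | ⟨c, rest⟩
    · exact absurd rfl hne
    have hzr : ∀ c' ∈ rest, c' ≠ '\x00' := fun c' hc' => hz c' (by simp [hc'])
    have hA := aMain.eq_def (c :: rest) parts
    by_cases hc : c = '"'
    · subst hc
      simp only [reduceIte] at hA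
      split at hA
      · -- unterminated quote: both none
        rename_i hq
        rw [hA]
        have hq2 := aQuoted_none_inq [] rest hzr hq ['"']
        rw [bFull]
        rw [show bSplit ('"' :: rest) [] false = bSplit rest ['"'] true from by
          rw [bSplit]; simp]
        rcases hsp : bSplit rest ['"'] true with ⟨segs, q⟩
        try rw [hsp] at hq2
        simp at hq2
        simp [hq2]
      · rename_i content rest' hq
        obtain ⟨w, u, hld, hu, hcontent, hhead⟩ :=
          aQuoted_some_decomp [] rest hzr content rest' hq
        simp at hcontent
        subst hcontent
        have hBsplit : bSplit ('"' :: rest) [] false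
            = bSplit rest' ('"' :: (w ++ ['"'])) false := by
          rw [show bSplit ('"' :: rest) [] false = bSplit rest ['"'] true from by
            rw [bSplit]; simp]
          rw [hld, bSplit_pass_quoted w hu]
          rw [show bSplit ('"' :: rest') (['"'] ++ w) true
              = bSplit rest' (['"'] ++ w ++ ['"']) false from by rw [bSplit]; simp]
          simp
        rcases rest' with _ | ⟨d, rest''⟩
        · -- end of input after closing quote
          simp only [] at hA
          rw [hA, bFull, hBsplit]
          simp only [bSplit]
          rw [bValidate, bValidSeg_quoted_good w hu]
          by_cases hu0 : content = []
          · simp [hu0]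
          · simp [hu0, bValidate]
        · simp only [] at hA
          by_cases hd : d = '.'
          · subst hd
            rw [if_pos rfl] at hA
            rw [hA, bFull, hBsplit]
            rw [show bSplit ('.' :: rest'') ('"' :: (w ++ ['"'])) false
                = (('"' :: (w ++ ['"'])) :: (bSplit rest'' [] false).1,
                   (bSplit rest'' [] false).2) from by
              rw [bSplit]; simp]
            rcases hrest'' : rest'' with _ | ⟨e, rest₃⟩
            · -- trailing dot: both none
              simp only [bSplit, if_pos rfl, reduceIte]
              rcases hv : bValidSeg ('"' :: (w ++ ['"'])) with _ | p
              · rw [bValidate_cons_none hv]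
                simp
              · rw [bValidate_cons_some hv]
                rw [bValidate_cons_none (show bValidSeg [] = none from rfl)]
                simp
            · rw [← hrest'']
              have hne'' : rest'' ≠ [] := by rw [hrest'']; simp
              rw [if_neg hne'']
              by_cases hu0 : content = []
              · rw [if_pos hu0]
                rcases hsp : bSplit rest'' [] false with ⟨segs', q⟩
                have hv : bValidSeg ('"' :: (w ++ ['"'])) = none := by
                  rw [bValidSeg_quoted_good w hu, if_pos hu0]
                cases q <;> simp [bValidate_cons_none hv]
              · rw [if_neg hu0]
                have hlen : rest''.length ≤ n := by
                  have hh := congrArg List.length hld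
                  simp at hh hl
                  omega
                have hzrr : ∀ c' ∈ rest'', c' ≠ '\x00' := by
                  intro c' hc'
                  exact hzr c' (by rw [hld]; simp [hc'])
                rw [ih rest'' hlen hne'' hzrr (parts ++ [(String.ofList content, true)])]
                have hv : bValidSeg ('"' :: (w ++ ['"'])) = some (String.ofList content, true) := by
                  rw [bValidSeg_quoted_good w hu, if_neg hu0]
                rw [bFull]
                rcases hsp : bSplit rest'' [] false with ⟨segs', q⟩
                cases q
                · rcases hbv : bValidate segs' with _ | v <;>
                    simp [bValidate_cons_some hv, hbv]
                · simp
          · -- junk after the closing quote: both none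
            have hdq : d ≠ '"' := hhead d (by simp)
            rw [if_neg hd] at hA
            rw [hA]
            rw [show (if content = [] then none else none :
                Option (List (String × Bool))) = none from by split <;> rfl]
            rw [bFull, hBsplit]
            rw [show bSplit (d :: rest'') ('"' :: (w ++ ['"'])) false
                = bSplit rest'' (('"' :: (w ++ ['"'])) ++ [d])
                    (if d = '"' then true else false) from by
              rw [bSplit, if_neg hdq]
              rw [if_neg (by simp [hd])]
              rw [if_neg hdq]]
            obtain ⟨t₃, r₃, hfirst⟩ :=
              bSplit_first_ext rest'' (('"' :: (w ++ ['"'])) ++ [d])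
                (if d = '"' then true else false)
            rcases hsp : bSplit rest'' (('"' :: (w ++ ['"'])) ++ [d])
                (if d = '"' then true else false) with ⟨segs', q⟩
            rw [hsp] at hfirst
            simp only at hfirst
            have hv : bValidSeg ('"' :: (w ++ '"' :: d :: t₃)) = none :=
              bValidSeg_quoted_garbage w hu d hdq t₃
            rw [hfirst]
            cases q <;> simp [bValidate_cons_none hv]
    · -- unquoted branch
      simp only [hc, reduceIte, ite_false] at hA
      obtain ⟨hsplit, hident, hstop⟩ := aUnquoted_spec rest
      split at hA
      · rename_i h0
        have hcd : c ≠ '.' := (head_ok_ne c h0).2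
        rcases haq : aUnquoted rest with ⟨t, r⟩
        rw [haq] at hsplit hident hstop
        simp only at hsplit hident hstop
        have hBsplit : bSplit (c :: rest) [] false = bSplit r (c :: t) false := by
          rw [bSplit, if_neg hc]
          rw [if_neg (by simp [hcd])]
          rw [hsplit, bSplit_pass_ident t hident]
          simp
        have htall : t.all pvIdentChar = true := List.all_eq_true.mpr hident
        have hvgood : bValidSeg (c :: t) = some (String.ofList (c :: t), false) :=
          bValidSeg_good_unquoted c hc h0 t htall
        split at hA
        · -- input ends with the identifier
          rename_i hre
          rw [haq] at hre
          simp only at hre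
          subst hre
          rw [haq] at hA
          simp only at hA
          rw [hA, bFull, hBsplit]
          simp only [bSplit]
          rw [bValidate_cons_some hvgood]
          simp [bValidate]
        · rename_i d r'' hre
          rw [haq] at hre
          simp only at hre
          subst hre
          rw [haq] at hA
          simp only at hA
          by_cases hd : d = '.'
          · subst hd
            rw [if_pos rfl] at hA
            rw [hA, bFull, hBsplit]
            rw [show bSplit ('.' :: r'') (c :: t) false
                = ((c :: t) :: (bSplit r'' [] false).1, (bSplit r'' [] false).2) from by
              rw [bSplit]; simp]
            rcases hr'' : r'' with _ | ⟨e, r₃⟩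
            · -- trailing dot: both none
              simp only [bSplit, if_pos rfl, reduceIte]
              rw [bValidate_cons_some hvgood]
              rw [bValidate_cons_none (show bValidSeg [] = none from rfl)]
              simp
            · rw [← hr'']
              have hne'' : r'' ≠ [] := by rw [hr'']; simp
              rw [if_neg hne'']
              have hlen : r''.length ≤ n := by
                have hh := congrArg List.length hsplit
                simp at hh
                simp at hl
                omega
              have hzrr : ∀ c' ∈ r'', c' ≠ '\x00' := by
                intro c' hc'
                exact hzr c' (by rw [hsplit]; simp [hc'])
              rw [ih r'' hlen hne'' hzrr (parts ++ [(String.ofList (c :: t), false)])]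
              rw [bFull]
              rcases hsp : bSplit r'' [] false with ⟨segs', q⟩
              cases q
              · rcases hbv : bValidate segs' with _ | v <;>
                  simp [bValidate_cons_some hvgood, hbv]
              · simp
          · -- junk after the identifier: both none
            rw [if_neg hd] at hA
            rw [hA]
            have hdi : pvIdentChar d = false := hstop d (by simp)
            rw [bFull, hBsplit]
            rw [show bSplit (d :: r'') (c :: t) false
                = bSplit r'' ((c :: t) ++ [d]) (if d = '"' then true else false) from by
              by_cases hdd : d = '"'
              · subst hdd
                rw [bSplit, if_pos rfl]
                simp
              · rw [bSplit, if_neg hdd]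
                rw [if_neg (by simp [hd])]
                rw [if_neg hdd]]
            obtain ⟨t₃, r₃, hfirst⟩ :=
              bSplit_first_ext r'' ((c :: t) ++ [d]) (if d = '"' then true else false)
            rcases hsp : bSplit r'' ((c :: t) ++ [d]) (if d = '"' then true else false)
              with ⟨segs', q⟩
            try rw [hsp] at hfirst
            try simp only at hfirst
            subst hfirst
            have hv : bValidSeg (c :: (t ++ d :: t₃)) = none :=
              bValidSeg_bad_tail c hc t d hdi t₃
            cases q <;> simp [bValidate_cons_none hv]
      · -- invalid first character: both none
        rename_i h0
        have h0f : (PySem.Chars.isalpha c || decide (c = '_')) = false := by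
          simpa using h0
        rw [hA, bFull]
        by_cases hcd : c = '.'
        · subst hcd
          rw [show bSplit ('.' :: rest) [] false
              = ([] :: (bSplit rest [] false).1, (bSplit rest [] false).2) from by
            rw [bSplit]; simp]
          rcases hsp : bSplit rest [] false with ⟨segs', q⟩
          cases q <;> simp [bValidate_cons_none (show bValidSeg [] = none from rfl)]
        · rw [show bSplit (c :: rest) [] false
              = bSplit rest [c] (if c = '"' then true else false) from by
            rw [bSplit, if_neg hc]
            rw [if_neg (by simp [hcd])]
            rw [if_neg hc]
            simp]
          obtain ⟨t₃, r₃, hfirst⟩ := bSplit_first_ext rest [c] (if c = '"' then true else false)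
          rcases hsp : bSplit rest [c] (if c = '"' then true else false) with ⟨segs', q⟩
          try rw [hsp] at hfirst
          try simp only at hfirst
          subst hfirst
          have hv : bValidSeg (c :: t₃) = none := bValidSeg_bad_head c hc h0f t₃
          cases q <;> simp [bValidate_cons_none hv]

-- ===== VERDICT (by name: the statement is the Claim_ definition above) =====
theorem parse_identifier_parts_py_spec : Claim_equal_parse_identifier_parts_py := by
  intro s hdom
  unfold Spec_parse_identifier_parts_py
  rw [bFull_spec, parse_identifier_parts_py]
  rcases hl : s.toList with _ | ⟨c, rest⟩
  · simp [aMain, bFull, bSplit, bValidate, bValidSeg]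
  · have hz : ∀ c' ∈ s.toList, c' ≠ '\x00' := by
      intro c' hc'
      have hall : s.toList.all pvDomChar = true := hdom
      rw [List.all_eq_true] at hall
      have hc := hall c' hc'
      intro h0
      subst h0
      simp [pvDomChar] at hc
    rw [← hl]
    simpa using master s.toList.length s.toList le_rfl (by rw [hl]; simp) hz []
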